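-- pv_equiv track=rewrite | github.com/M4ddinPoe/DeepLyricsGenerator | clean_file.py | remove_brackets
-- ===== SOURCE A (Python) =====
-- def remove_brackets(text):
--
--     cleaned_text = ''
--     in_bracket = False
--
--     for char in text:
--
--         if in_bracket:
--             if char == ']':
--                 in_bracket = False
--
--             continue
--
--         if char == '[':
--             in_bracket = True
--             continue
--
--         if char == '.' or char == ',' or char == '"' or char == '-' or char == '(' or char == ')' or char == '?' or char == '!' or char == '&' or char == ':' or char == ';':
--             continue
--
--         cleaned_text = cleaned_text + char
--
--     return cleaned_text
-- ===== SOURCE B (Python) =====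
-- def remove_brackets(text):
--     parts = text.split('[')
--     kept = parts[0] + ''.join(p.partition(']')[2] for p in parts[1:])
--     return kept.translate(str.maketrans('', '', '.,"-()?!&:;'))
-- ===== Notes on version B (the rewrite author's own statement) =====
-- stated objective: idiomatic
-- what changed: Replaced the char-by-char boolean state machine with repeated string concatenation by split('[') / partition(']') segment processing plus a translate table for the punctuation.
import Mathlib
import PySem

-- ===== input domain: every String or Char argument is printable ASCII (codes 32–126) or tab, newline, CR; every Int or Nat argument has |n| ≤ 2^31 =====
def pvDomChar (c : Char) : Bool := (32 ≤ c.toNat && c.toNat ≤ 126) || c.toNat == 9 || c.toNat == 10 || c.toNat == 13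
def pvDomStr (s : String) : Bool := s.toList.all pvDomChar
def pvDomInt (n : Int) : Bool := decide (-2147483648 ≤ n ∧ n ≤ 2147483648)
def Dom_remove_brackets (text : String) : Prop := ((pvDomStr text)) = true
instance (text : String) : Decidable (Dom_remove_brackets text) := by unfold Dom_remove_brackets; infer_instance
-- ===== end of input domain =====

-- B replaces A's char-by-char boolean state machine by split('[')/partition(']') segment
-- processing plus a punctuation-stripping translation table (idiomatic; avoids A's
-- quadratic string concatenation).

-- ===== PORT A =====
-- literal port of A's loop: state = (cleaned_text, in_bracket), strings as List Char
def pvStepA (st : List Char × Bool) (c : Char) : List Char × Bool :=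
  if st.2 then
    (if c = ']' then (st.1, false) else (st.1, true))
  else if c = '[' then (st.1, true)
  else if c = '.' ∨ c = ',' ∨ c = '"' ∨ c = '-' ∨ c = '(' ∨ c = ')' ∨ c = '?' ∨ c = '!' ∨ c = '&' ∨ c = ':' ∨ c = ';' then st
  else (st.1 ++ [c], st.2)

def remove_brackets (text : String) : String :=
  String.ofList (text.toList.foldl pvStepA ([], false)).1

-- ===== PORT B =====
-- text.split('['), represented as (parts[0], parts[1:]) since B only uses that split
def pvSplitLB : List Char → List Char × List (List Char)
  | [] => ([], [])
  | c :: cs =>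
    let r := pvSplitLB cs
    if c = '[' then ([], r.1 :: r.2) else (c :: r.1, r.2)

-- p.partition(']')[2]: the part after the first ']', '' if there is none
def pvAfterRB (p : List Char) : List Char :=
  match p.dropWhile (fun c => c ≠ ']') with
  | [] => []
  | _ :: t => t

-- kept.translate(...) deletes these characters
def pvPunct : List Char := ['.', ',', '"', '-', '(', ')', '?', '!', '&', ':', ';']

def remove_brackets_alt (text : String) : String :=
  let r := pvSplitLB text.toList
  String.ofList (((r.1 ++ (r.2.map pvAfterRB).flatten).filter (fun c => ¬ c ∈ pvPunct)))

-- ===== PRECONDITION & SPEC =====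
def Spec_remove_brackets (text : String) (out : String) : Prop := out = remove_brackets_alt text
instance (text : String) (out : String) : Decidable (Spec_remove_brackets text out) := by unfold Spec_remove_brackets; infer_instance

-- ===== CLAIM (what is proved, stated in full; the proofs are below) =====
def Claim_equal_remove_brackets : Prop := ∀ (text : String), Dom_remove_brackets text → Spec_remove_brackets text (remove_brackets text)

-- ===== LEMMAS AND PROOFS =====

-- what B keeps when the scan starts outside a bracket
def pvStrip (cs : List Char) : List Char :=
  (pvSplitLB cs).1 ++ (((pvSplitLB cs).2).map pvAfterRB).flatten

-- what B keeps when the scan starts inside a bracket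
def pvSkip (cs : List Char) : List Char :=
  pvAfterRB (pvSplitLB cs).1 ++ (((pvSplitLB cs).2).map pvAfterRB).flatten

theorem pvStrip_lb (cs : List Char) : pvStrip ('[' :: cs) = pvSkip cs := by
  simp [pvStrip, pvSkip, pvSplitLB]

theorem pvStrip_cons {c : Char} (h : c ≠ '[') (cs : List Char) :
    pvStrip (c :: cs) = c :: pvStrip cs := by
  simp [pvStrip, pvSplitLB, h]

theorem pvSkip_rb (cs : List Char) : pvSkip (']' :: cs) = pvStrip cs := by
  simp [pvSkip, pvStrip, pvSplitLB, pvAfterRB]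

theorem pvSkip_cons {c : Char} (h : c ≠ ']') (cs : List Char) :
    pvSkip (c :: cs) = pvSkip cs := by
  by_cases hl : c = '['
  · subst hl; simp [pvSkip, pvSplitLB, pvAfterRB]
  · simp [pvSkip, pvSplitLB, hl, pvAfterRB, h]

theorem pv_main (cs : List Char) : ∀ acc : List Char,
    (cs.foldl pvStepA (acc, false)).1 = acc ++ (pvStrip cs).filter (fun c => ¬ c ∈ pvPunct)
    ∧ (cs.foldl pvStepA (acc, true)).1 = acc ++ (pvSkip cs).filter (fun c => ¬ c ∈ pvPunct) := by
  induction cs with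
  | nil => intro acc; simp [pvStrip, pvSkip, pvSplitLB, pvAfterRB]
  | cons c cs ih =>
    intro acc
    constructor
    · by_cases hl : c = '['
      · subst hl
        simpa [List.foldl_cons, pvStepA, pvStrip_lb] using (ih acc).2
      · rw [List.foldl_cons]
        by_cases hp : c ∈ pvPunct
        · have hstep : pvStepA (acc, false) c = (acc, false) := by
            fin_cases hp <;> simp_all [pvStepA, pvPunct]
          rw [hstep, pvStrip_cons hl]
          simp [hp, (ih acc).1]
        · have hstep : pvStepA (acc, false) c = (acc ++ [c], false) := by
            simp [pvPunct] at hp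
            simp [pvStepA, hl, hp]
          rw [hstep, pvStrip_cons hl]
          simp [hp, (ih (acc ++ [c])).1]
    · by_cases hr : c = ']'
      · subst hr
        simpa [List.foldl_cons, pvStepA, pvSkip_rb] using (ih acc).1
      · rw [List.foldl_cons]
        have hstep : pvStepA (acc, true) c = (acc, true) := by simp [pvStepA, hr]
        rw [hstep, pvSkip_cons hr]
        exact (ih acc).2

-- ===== VERDICT (by name: the statement is the Claim_ definition above) =====
theorem remove_brackets_spec : Claim_equal_remove_brackets := by
  intro text _
  unfold Spec_remove_brackets remove_brackets remove_brackets_alt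
  rw [(pv_main text.toList []).1]
  simp [pvStrip]
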